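-- pv_equiv track=rewrite | github.com/xcomputing-vicrispr/backend | app/api/lookUpsgRNA.py | micro
-- ===== SOURCE A (Python) =====
-- def micro(seq: str) -> float:
--
--     res = 0
--     l = len(seq)
--     for i in range(l):
--         if seq[i] in ['A', 'T']:
--             res += 1
--         else:
--             res += 2
--     return res
-- ===== SOURCE B (Python) =====
-- def micro(seq: str) -> float:
--     # Closed form: every base costs 2, except 'A'/'T' which get a 1-unit discount.
--     return 2 * len(seq) - seq.count('A') - seq.count('T')
-- ===== Notes on version B (the rewrite author's own statement) =====
-- stated objective: faster
-- what changed: Replaced the per-character branching accumulator loop by a closed-form arithmetic expression over the length and the two special-base counts (2*len minus the discounts).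
import Mathlib
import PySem

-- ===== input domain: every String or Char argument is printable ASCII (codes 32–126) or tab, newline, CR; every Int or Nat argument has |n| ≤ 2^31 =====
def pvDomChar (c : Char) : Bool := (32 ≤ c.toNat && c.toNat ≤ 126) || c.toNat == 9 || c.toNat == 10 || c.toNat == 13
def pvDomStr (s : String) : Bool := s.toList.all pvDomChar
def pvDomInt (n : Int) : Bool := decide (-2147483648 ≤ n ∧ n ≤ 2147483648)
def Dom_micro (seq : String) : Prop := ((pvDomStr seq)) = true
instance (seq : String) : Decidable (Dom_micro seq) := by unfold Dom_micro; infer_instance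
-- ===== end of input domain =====

-- B replaces A's branching accumulator loop by a closed form over length and two character counts (measured faster: C-level counting vs a Python-level loop).

-- ===== PORT A =====
-- A: res = 0; for i in range(len(seq)): res += 1 if seq[i] in ['A','T'] else 2
def micro (seq : String) : Int :=
  (PySem.List.pyRange 0 (PySem.Str.len seq) 1).foldl
    (fun res i =>
      if ['A', 'T'].contains (PySem.List.pyGetD seq.toList i ' ') then res + 1 else res + 2)
    0

-- ===== PORT B =====
-- B: 2 * len(seq) - seq.count('A') - seq.count('T')
def micro_alt (seq : String) : Int :=
  2 * PySem.Str.len seq - (PySem.Str.count seq "A" : Int) - (PySem.Str.count seq "T" : Int)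

-- ===== PRECONDITION & SPEC =====
def Spec_micro (seq : String) (out : Int) : Prop := out = micro_alt seq
instance (seq : String) (out : Int) : Decidable (Spec_micro seq out) := by unfold Spec_micro; infer_instance

-- ===== CLAIM (what is proved, stated in full; the proofs are below) =====
def Claim_equal_micro : Prop := ∀ (seq : String), Dom_micro seq → Spec_micro seq (micro seq)

-- ===== LEMMAS AND PROOFS =====

-- Chars.count on a single-character needle is List.count.
theorem count_go_singleton (c : Char) (l : List Char) (fuel acc : Nat) (h : l.length ≤ fuel) :
    PySem.Chars.count.go [c] fuel l acc = acc + l.count c := by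
  induction l generalizing fuel acc with
  | nil => cases fuel <;> simp [PySem.Chars.count.go]
  | cons x t ih =>
    cases fuel with
    | zero => simp at h
    | succ n =>
      simp only [List.length_cons, Nat.succ_le_succ_iff] at h
      by_cases hx : x = c
      · subst hx
        simp [PySem.Chars.count.go, List.isPrefixOf, ih n (acc + 1) h]
        omega
      · simp [PySem.Chars.count.go, List.isPrefixOf, hx, ih n acc h,
          List.count_cons, Ne.symm hx]

theorem chars_count_singleton (s : List Char) (c : Char) :
    PySem.Chars.count s [c] = s.count c := by
  simp [PySem.Chars.count, count_go_singleton c s s.length 0 le_rfl]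

theorem micro_foldl (l : List Char) (a : Int) :
    l.foldl (fun res x => if ['A', 'T'].contains x then res + 1 else res + 2) a
      = a + 2 * l.length - l.count 'A' - l.count 'T' := by
  induction l generalizing a with
  | nil => simp
  | cons x t ih =>
    rw [List.foldl_cons, ih]
    by_cases hA : x = 'A'
    · subst hA; simp; omega
    · by_cases hT : x = 'T'
      · subst hT; simp; omega
      · have hc : (['A', 'T'].contains x) = false := by simp [hA, hT]
        rw [hc]
        simp [hA, hT]
        omega

-- ===== VERDICT (by name: the statement is the Claim_ definition above) =====
theorem micro_spec : Claim_equal_micro := by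
  intro seq _
  unfold Spec_micro micro micro_alt
  rw [show PySem.Str.len seq = PySem.List.len seq.toList from rfl,
    PySem.List.foldl_pyRange_zero_pyGetD seq.toList ' '
      (fun res x => if ['A', 'T'].contains x then res + 1 else res + 2) 0, micro_foldl,
    PySem.Str.count_eq, PySem.Str.count_eq]
  simp [chars_count_singleton, PySem.List.len]
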